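-- pv_equiv track=rewrite | github.com/davidgundry/explicit-instructions | python/load_process_exp3.py | correct_form
-- ===== SOURCE A (Python) =====
-- def correct_form(array):
--     a1, a2, a3, n = 0,0,0,0
--     adj1 = ["big", "small"]
--     adj2 = ["empty", "filled"]
--     adj3 = ["red", "blue", "green"]
--     nouns = ["square","circle","triangle","diamond"]
--     for word in array:
--         if word in adj1:
--             a1 += 1
--         elif word in adj2:
--             a2 += 1
--         elif word in adj3:
--             a3 += 1
--         elif word in nouns:
--             n += 1
--     return (a1 < 2) and (a2 < 2) and (a3 < 2) and (n == 1)
-- ===== SOURCE B (Python) =====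
-- def correct_form(array):
--     adj1 = ["big", "small"]
--     adj2 = ["empty", "filled"]
--     adj3 = ["red", "blue", "green"]
--     nouns = ["square", "circle", "triangle", "diamond"]
--     a1 = sum(array.count(w) for w in adj1)
--     a2 = sum(array.count(w) for w in adj2)
--     a3 = sum(array.count(w) for w in adj3)
--     n = sum(array.count(w) for w in nouns)
--     return (a1 < 2) and (a2 < 2) and (a3 < 2) and (n == 1)
-- ===== Notes on version B (the rewrite author's own statement) =====
-- stated objective: idiomatic
-- what changed: Replaced A's single branching elif-chain fold maintaining four counters with per-category aggregation: count each category word with list.count and sum per category, then test the thresholds.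
import Mathlib
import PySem

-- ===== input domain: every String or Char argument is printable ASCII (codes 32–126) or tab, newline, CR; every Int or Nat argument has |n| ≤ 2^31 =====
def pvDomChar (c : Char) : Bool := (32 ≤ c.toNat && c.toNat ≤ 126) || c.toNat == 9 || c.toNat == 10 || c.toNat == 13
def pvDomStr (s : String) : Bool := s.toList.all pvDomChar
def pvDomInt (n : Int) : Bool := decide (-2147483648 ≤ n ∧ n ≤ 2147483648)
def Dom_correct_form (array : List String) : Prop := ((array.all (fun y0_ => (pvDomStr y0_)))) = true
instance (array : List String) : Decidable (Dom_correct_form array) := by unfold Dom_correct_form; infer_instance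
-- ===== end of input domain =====

-- B replaces A's single branching elif-chain fold with per-category word counts (list.count) summed per category; idiomatic, same O(n).


-- ===== PORT A =====
-- one loop step of A: the if/elif chain updating (a1, a2, a3, n)
def cfStep (s : Int × Int × Int × Int) (word : String) : Int × Int × Int × Int :=
  if (["big", "small"]).contains word then (s.1 + 1, s.2.1, s.2.2.1, s.2.2.2)
  else if (["empty", "filled"]).contains word then (s.1, s.2.1 + 1, s.2.2.1, s.2.2.2)
  else if (["red", "blue", "green"]).contains word then (s.1, s.2.1, s.2.2.1 + 1, s.2.2.2)
  else if (["square", "circle", "triangle", "diamond"]).contains word then (s.1, s.2.1, s.2.2.1, s.2.2.2 + 1)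
  else s

def correct_form (array : List String) : Bool :=
  let r := array.foldl cfStep (0, 0, 0, 0)
  decide (r.1 < 2) && decide (r.2.1 < 2) && decide (r.2.2.1 < 2) && decide (r.2.2.2 = 1)

-- ===== PORT B =====
def correct_form_alt (array : List String) : Bool :=
  let a1 := ((["big", "small"]).map (fun w => PySem.List.count array w)).sum
  let a2 := ((["empty", "filled"]).map (fun w => PySem.List.count array w)).sum
  let a3 := ((["red", "blue", "green"]).map (fun w => PySem.List.count array w)).sum
  let n := ((["square", "circle", "triangle", "diamond"]).map (fun w => PySem.List.count array w)).sum
  decide (a1 < 2) && decide (a2 < 2) && decide (a3 < 2) && decide (n = 1)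

-- ===== PRECONDITION & SPEC =====
def Spec_correct_form (array : List String) (out : Bool) : Prop := out = correct_form_alt array
instance (array : List String) (out : Bool) : Decidable (Spec_correct_form array out) := by unfold Spec_correct_form; infer_instance

-- ===== CLAIM (what is proved, stated in full; the proofs are below) =====
def Claim_equal_correct_form : Prop := ∀ (array : List String), Dom_correct_form array → Spec_correct_form array (correct_form array)

-- ===== LEMMAS AND PROOFS =====
lemma cf_fold_counts (xs : List String) (a1 a2 a3 n : Int) :
    xs.foldl cfStep (a1, a2, a3, n) =
      (a1 + xs.count "big" + xs.count "small",
       a2 + xs.count "empty" + xs.count "filled",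
       a3 + xs.count "red" + xs.count "blue" + xs.count "green",
       n + xs.count "square" + xs.count "circle" + xs.count "triangle" + xs.count "diamond") := by
  induction xs generalizing a1 a2 a3 n with
  | nil => simp
  | cons w xs ih =>
    simp only [List.foldl_cons]
    by_cases h1 : w = "big"
    · subst h1; simp only [cfStep]; norm_num; rw [ih]; simp [Prod.ext_iff]; omega
    by_cases h2 : w = "small"
    · subst h2; simp only [cfStep]; norm_num; rw [ih]; simp [Prod.ext_iff]; omega
    by_cases h3 : w = "empty"
    · subst h3; simp only [cfStep]; norm_num; rw [ih]; simp [Prod.ext_iff]; omega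
    by_cases h4 : w = "filled"
    · subst h4; simp only [cfStep]; norm_num; rw [ih]; simp [Prod.ext_iff]; omega
    by_cases h5 : w = "red"
    · subst h5; simp only [cfStep]; norm_num; rw [ih]; simp [Prod.ext_iff]; omega
    by_cases h6 : w = "blue"
    · subst h6; simp only [cfStep]; norm_num; rw [ih]; simp [Prod.ext_iff]; omega
    by_cases h7 : w = "green"
    · subst h7; simp only [cfStep]; norm_num; rw [ih]; simp [Prod.ext_iff]; omega
    by_cases h8 : w = "square"
    · subst h8; simp only [cfStep]; norm_num; rw [ih]; simp [Prod.ext_iff]; omega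
    by_cases h9 : w = "circle"
    · subst h9; simp only [cfStep]; norm_num; rw [ih]; simp [Prod.ext_iff]; omega
    by_cases h10 : w = "triangle"
    · subst h10; simp only [cfStep]; norm_num; rw [ih]; simp [Prod.ext_iff]; omega
    by_cases h11 : w = "diamond"
    · subst h11; simp only [cfStep]; norm_num; rw [ih]; simp [Prod.ext_iff]; omega
    · simp only [cfStep, List.contains_eq_mem, List.mem_cons, List.not_mem_nil,
        decide_eq_true_eq, h1, h2, h3, h4, h5, h6, h7, h8, h9, h10, h11, or_self, if_false]
      rw [ih]
      simp [h1, h2, h3, h4, h5, h6, h7, h8, h9, h10, h11]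

-- ===== VERDICT (by name: the statement is the Claim_ definition above) =====
theorem correct_form_spec : Claim_equal_correct_form := by
  intro array _
  unfold Spec_correct_form correct_form correct_form_alt
  rw [cf_fold_counts]
  simp only [PySem.List.count_eq, List.map_cons, List.map_nil, List.sum_cons, List.sum_nil]
  congr 1
  · congr 1
    · congr 1
      · rw [decide_eq_decide]; omega
      · rw [decide_eq_decide]; omega
    · rw [decide_eq_decide]; omega
  · rw [decide_eq_decide]; omega
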